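-- pv_equiv track=rewrite | github.com/Rebecavitoria45/TSP-INICIAL | TSP.py | eh_valida_rota
-- ===== SOURCE A (Python) =====
-- def eh_valida_rota(rota):
--     if len(rota) == 13:
--         rota_sem_extremos = rota[1:-1]  # removendo a cidade 0 do início e fim
--
--         for i in range(len(rota_sem_extremos)):
--             for j in range(i + 1, len(rota_sem_extremos)):
--                 if rota_sem_extremos[i] == rota_sem_extremos[j]:
--                     return False
--         return True
--     else:
--         return False
-- ===== SOURCE B (Python) =====
-- def eh_valida_rota(rota):
--     if len(rota) != 13:
--         return False
--     seen = set()
--     for cidade in rota[1:-1]: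
--         if cidade in seen:
--             return False
--         seen.add(cidade)
--     return True
-- ===== Notes on version B (the rewrite author's own statement) =====
-- stated objective: simpler
-- what changed: Replaces the nested index-pair scan of the interior slice with a single pass that maintains a set of seen cities and fails on the first repeat.
import Mathlib
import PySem

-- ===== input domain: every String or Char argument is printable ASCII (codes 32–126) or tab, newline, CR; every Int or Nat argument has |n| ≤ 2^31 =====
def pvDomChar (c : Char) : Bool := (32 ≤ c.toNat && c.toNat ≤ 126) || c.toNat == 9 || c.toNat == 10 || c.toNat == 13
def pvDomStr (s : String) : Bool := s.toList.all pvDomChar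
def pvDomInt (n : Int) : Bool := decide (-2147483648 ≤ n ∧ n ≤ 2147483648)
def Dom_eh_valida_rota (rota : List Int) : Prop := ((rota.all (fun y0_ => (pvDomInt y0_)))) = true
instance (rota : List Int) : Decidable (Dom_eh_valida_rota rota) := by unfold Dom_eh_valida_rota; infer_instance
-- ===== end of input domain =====

-- B replaces A's nested index-pair scan of the interior slice by a single pass with a set of
-- seen cities (objective: simpler, one pass instead of two nested loops).

-- ===== PORT A =====
-- inner loop: for j in range(i+1, len(xs)): if xs[i] == xs[j]: return False
def ehA_inner (xs : List Int) (xi : Int) (j : Nat) : Bool :=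
  if h : j < xs.length then
    if xi == xs[j] then false else ehA_inner xs xi (j + 1)
  else true
termination_by xs.length - j

-- outer loop: for i in range(len(xs)): …
def ehA_outer (xs : List Int) (i : Nat) : Bool :=
  if h : i < xs.length then
    if ehA_inner xs xs[i] (i + 1) then ehA_outer xs (i + 1) else false
  else true
termination_by xs.length - i

def eh_valida_rota (rota : List Int) : Bool :=
  if rota.length == 13 then
    ehA_outer (PySem.List.slice rota (some 1) (some (-1))) 0
  else false

-- ===== PORT B =====
-- single pass with a 'seen' set, False on the first repeated interior city
def ehB_go (seen : PySem.Set Int) : List Int → Bool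
  | [] => true
  | c :: rest =>
    if PySem.Set.contains seen c then false else ehB_go (PySem.Set.add seen c) rest

def eh_valida_rota_alt (rota : List Int) : Bool :=
  if rota.length == 13 then
    ehB_go PySem.Set.empty (PySem.List.slice rota (some 1) (some (-1)))
  else false

-- ===== PRECONDITION & SPEC =====
def Spec_eh_valida_rota (rota : List Int) (out : Bool) : Prop := out = eh_valida_rota_alt rota
instance (rota : List Int) (out : Bool) : Decidable (Spec_eh_valida_rota rota out) := by unfold Spec_eh_valida_rota; infer_instance

-- ===== CLAIM (what is proved, stated in full; the proofs are below) =====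
def Claim_equal_eh_valida_rota : Prop := ∀ (rota : List Int), Dom_eh_valida_rota rota → Spec_eh_valida_rota rota (eh_valida_rota rota)

-- ===== LEMMAS AND PROOFS =====

theorem ehA_inner_eq (xs : List Int) (xi : Int) (j : Nat) :
    ehA_inner xs xi j = (xs.drop j).all (fun y => !(xi == y)) := by
  fun_induction ehA_inner xs xi j with
  | case1 j h heq =>
    rw [List.drop_eq_getElem_cons h, List.all_cons, heq]; simp
  | case2 j h hne ih =>
    have hb : (xi == xs[j]) = false := by
      simpa using (by simpa using hne : ¬ xi = xs[j])
    rw [ih, List.drop_eq_getElem_cons h, List.all_cons, hb]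
    simp
  | case3 j h =>
    rw [List.drop_eq_nil_of_le (by omega)]; rfl

theorem ehA_outer_eq (xs : List Int) (i : Nat) :
    ehA_outer xs i = decide (xs.drop i).Nodup := by
  fun_induction ehA_outer xs i with
  | case1 i h hall ih =>
    have hmem : xs[i] ∉ xs.drop (i + 1) := by
      simp [ehA_inner_eq] at hall
      exact fun hm => hall _ hm rfl
    rw [ih, decide_eq_decide, List.drop_eq_getElem_cons h]
    exact (List.nodup_cons.trans (and_iff_right hmem)).symm
  | case2 i h hall =>
    have hmem : xs[i] ∈ xs.drop (i + 1) := by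
      simpa [ehA_inner_eq] using hall
    symm; rw [decide_eq_false_iff_not, List.drop_eq_getElem_cons h]
    exact fun hn => (List.nodup_cons.mp hn).1 hmem
  | case3 i h =>
    rw [List.drop_eq_nil_of_le (by omega)]; simp

theorem ehB_go_eq (xs : List Int) (seen : PySem.Set Int) :
    ehB_go seen xs = decide ((∀ c ∈ xs, c ∉ seen) ∧ xs.Nodup) := by
  induction xs generalizing seen with
  | nil =>
    rw [show ehB_go seen [] = true from rfl]
    symm; rw [decide_eq_true_iff]
    exact ⟨fun c hc => absurd hc (List.not_mem_nil), List.nodup_nil⟩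
  | cons c rest ih =>
    rw [ehB_go]
    by_cases hc : c ∈ seen
    · rw [if_pos (PySem.Set.contains_iff seen c |>.mpr hc)]
      symm; rw [decide_eq_false_iff_not]
      exact fun hp => hp.1 c (List.mem_cons_self) hc
    · rw [if_neg (fun hcon => hc (PySem.Set.contains_iff seen c |>.mp hcon)), ih]
      rw [decide_eq_decide]
      simp only [List.mem_cons, List.nodup_cons, PySem.Set.mem_add, not_or]
      constructor
      · rintro ⟨hall, hnd⟩
        exact ⟨fun x hx => hx.elim (fun e => e ▸ hc) (fun hm => (hall x hm).1),
               fun hm => (hall c hm).2 rfl, hnd⟩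
      · rintro ⟨hall, hnm, hnd⟩
        exact ⟨fun x hx => ⟨hall x (Or.inr hx), fun e => hnm (e ▸ hx)⟩, hnd⟩

-- ===== VERDICT (by name: the statement is the Claim_ definition above) =====
theorem eh_valida_rota_spec : Claim_equal_eh_valida_rota := by
  intro rota _
  unfold Spec_eh_valida_rota eh_valida_rota eh_valida_rota_alt
  by_cases h : rota.length = 13
  · simp only [h]
    rw [ehA_outer_eq, ehB_go_eq]
    simp [PySem.Set.empty]
  · simp [h]
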